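-- pv_equiv track=rewrite | github.com/AlioOlioAlgo/AlioIlioAlgo | week5/피자판매_2632/박상준2.py | suffixSum
-- ===== SOURCE A (Python) =====
-- import collections
--
-- def suffixSum(arr, l):
--     default = collections.defaultdict(int)
--     for i in range(l):
--         suffix = 0
--         for cur in arr[i:] + arr[:i]:
--             suffix += cur
--             default[suffix] += 1
--     default[sum(arr)] = 1
--     return default
-- ===== SOURCE B (Python) =====
-- import collections
--
-- def suffixSum(arr, l):
--     # Rotations with offset >= n all coincide with arr itself, so only the first
--     # min(l, n) rotations are distinct: count those once (windows of the doubled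
--     # list, counted in one Counter pass), then add the l-n repeats as a single
--     # weighted pass over arr's running sums.
--     n = len(arr)
--     doubled = arr + arr
--     seq = []
--     for s in range(min(l, n)):
--         acc = 0
--         for x in doubled[s:s + n]:
--             acc += x
--             seq.append(acc)
--     counts = collections.Counter(seq)
--     reps = l - n
--     if reps > 0:
--         acc = 0
--         for x in arr:
--             acc += x
--             counts[acc] += reps
--     counts[sum(arr)] = 1
--     return counts
-- ===== Notes on version B (the rewrite author's own statement) =====
-- stated objective: alternative
-- what changed: B collapses A's l rotation passes into min(l,n) distinct ones: rotations with offset >= n all equal arr, so B counts the distinct rotations' window sums once (windows of a doubled list, tallied by one Counter pass over a staged list of sums) and adds the remaining l-n identical passes as a single weighted pass over arr's running sums, making the cost O(min(l,n)*n) instead of A's O(l*n).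
import Mathlib
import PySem

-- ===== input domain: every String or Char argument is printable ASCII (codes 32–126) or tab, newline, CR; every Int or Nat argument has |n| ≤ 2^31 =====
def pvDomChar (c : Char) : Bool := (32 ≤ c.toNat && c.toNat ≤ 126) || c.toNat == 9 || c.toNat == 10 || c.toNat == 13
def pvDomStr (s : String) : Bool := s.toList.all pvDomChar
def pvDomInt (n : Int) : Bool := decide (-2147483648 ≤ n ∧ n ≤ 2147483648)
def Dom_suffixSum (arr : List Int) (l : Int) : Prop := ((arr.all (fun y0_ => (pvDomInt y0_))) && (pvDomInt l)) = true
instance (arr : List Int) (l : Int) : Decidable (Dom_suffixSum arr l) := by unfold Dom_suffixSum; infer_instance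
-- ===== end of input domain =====

-- B collapses A's l rotation passes into min(l,n) distinct ones plus one weighted
-- pass for the l-n repeated rotations, counting window sums of a doubled list with
-- a staged Counter pass (alternative algorithm; return-value equivalence).


-- ===== PORT A =====
def suffixSum (arr : List Int) (l : Int) : List (Int × Int) :=
  let d := (PySem.List.pyRange 0 l 1).foldl
    (fun d i =>
      ((PySem.List.slice arr (some i) none ++ PySem.List.slice arr none (some i)).foldl
        (fun (st : Int × PySem.Dict Int Int) cur =>
          (st.1 + cur, st.2.modify (st.1 + cur) 0 (· + 1)))
        ((0 : Int), d)).2)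
    PySem.Dict.empty
  (d.insert arr.sum 1).items

-- ===== PORT B =====
def suffixSum_alt (arr : List Int) (l : Int) : List (Int × Int) :=
  let n : Int := arr.length
  let doubled := arr ++ arr
  let seq := (PySem.List.pyRange 0 (min l n) 1).foldl
    (fun (seq : List Int) s =>
      ((PySem.List.slice doubled (some s) (some (s + n))).foldl
        (fun (st : Int × List Int) x => (st.1 + x, st.2 ++ [st.1 + x]))
        ((0 : Int), seq)).2)
    []
  let counts := PySem.Dict.counter seq
  let reps := l - n
  let counts := if 0 < reps then
      (arr.foldl
        (fun (st : Int × PySem.Dict Int Int) x =>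
          (st.1 + x, st.2.modify (st.1 + x) 0 (· + reps)))
        ((0 : Int), counts)).2
    else counts
  (counts.insert arr.sum 1).items

-- ===== PRECONDITION & SPEC =====
def Spec_suffixSum (arr : List Int) (l : Int) (out : List (Int × Int)) : Prop := out = suffixSum_alt arr l
instance (arr : List Int) (l : Int) (out : List (Int × Int)) : Decidable (Spec_suffixSum arr l out) := by unfold Spec_suffixSum; infer_instance

-- ===== CLAIM (what is proved, stated in full; the proofs are below) =====
def Claim_equal_suffixSum : Prop := ∀ (arr : List Int) (l : Int), Dom_suffixSum arr l → Spec_suffixSum arr l (suffixSum arr l)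

-- ===== LEMMAS AND PROOFS =====

/-- The running sums a+x₁, a+x₁+x₂, … of `xs` started from `a`. -/
def partialSums : Int → List Int → List Int
  | _, [] => []
  | a, x :: xs => (a + x) :: partialSums (a + x) xs

/-- A fold that keeps a running total and feeds it to `g` is a fold of `g` over the
running sums (covers A's inner loop, B's seq builder and B's weighted pass). -/
lemma accum_foldl {δ : Type} (g : δ → Int → δ) (xs : List Int) (a : Int) (d : δ) :
    (xs.foldl (fun (st : Int × δ) x => (st.1 + x, g st.2 (st.1 + x))) (a, d)).2
      = (partialSums a xs).foldl g d := by
  induction xs generalizing a d with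
  | nil => rfl
  | cons x xs ih => simpa [partialSums] using ih (a + x) (g d (a + x))

/-- One weighted counting pass: `for v in xs: d[v] += c`. -/
def cpass (c : Int) (xs : List Int) (d : PySem.Dict Int Int) : PySem.Dict Int Int :=
  xs.foldl (fun d v => d.modify v 0 (· + c)) d

/-- `accum_foldl` for A's inner loop (g = unit count). -/
lemma accumA (xs : List Int) (a : Int) (d : PySem.Dict Int Int) :
    (xs.foldl (fun (st : Int × PySem.Dict Int Int) cur =>
        (st.1 + cur, st.2.modify (st.1 + cur) 0 (· + 1))) (a, d)).2
      = cpass 1 (partialSums a xs) d :=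
  accum_foldl (fun d v => d.modify v 0 (· + 1)) xs a d

/-- `accum_foldl` for B's weighted pass (g = add c). -/
lemma accumW (c : Int) (xs : List Int) (a : Int) (d : PySem.Dict Int Int) :
    (xs.foldl (fun (st : Int × PySem.Dict Int Int) x =>
        (st.1 + x, st.2.modify (st.1 + x) 0 (· + c))) (a, d)).2
      = cpass c (partialSums a xs) d :=
  accum_foldl (fun d v => d.modify v 0 (· + c)) xs a d

/-- `accum_foldl` for B's seq builder (g = append). -/
lemma accumS (xs : List Int) (a : Int) (seq : List Int) :
    (xs.foldl (fun (st : Int × List Int) x =>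
        (st.1 + x, st.2 ++ [st.1 + x])) (a, seq)).2
      = seq ++ partialSums a xs := by
  rw [accum_foldl (fun sq v => sq ++ [v]) xs a seq, PySem.List.foldl_append_singleton]

lemma cpass_cons (c x : Int) (xs : List Int) (d : PySem.Dict Int Int) :
    cpass c (x :: xs) d = cpass c xs (d.modify x 0 (· + c)) := rfl

lemma getD_cpass (c : Int) (xs : List Int) (d : PySem.Dict Int Int) (v : Int) :
    (cpass c xs d).getD v 0 = d.getD v 0 + c * xs.count v := by
  induction xs generalizing d with
  | nil => simp [cpass]
  | cons x xs ih =>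
    rw [cpass_cons, ih, PySem.Dict.getD_modify]
    rcases eq_or_ne v x with rfl | h
    · simp
      ring
    · simp [h, Ne.symm h]

lemma keys_cpass (c : Int) (xs : List Int) (d : PySem.Dict Int Int) :
    (cpass c xs d).keys = PySem.Set.update d.keys xs :=
  PySem.Dict.keys_foldl_modify xs 0 (fun _ _ w => w + c) d

lemma nodup_cpass (c : Int) (xs : List Int) (d : PySem.Dict Int Int)
    (h : d.keys.Nodup) : (cpass c xs d).keys.Nodup :=
  PySem.Dict.nodup_keys_foldl_modify_key xs (fun v => v) 0 (fun _ _ w => w + c) d h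

/-- Two dicts with duplicate-free keys, the same key list and the same lookups agree. -/
lemma dict_ext_getD (d d' : PySem.Dict Int Int) (hd : d.keys.Nodup)
    (hk : d.keys = d'.keys) (hv : ∀ v, d.getD v 0 = d'.getD v 0) : d = d' := by
  apply PySem.Dict.ext
  rw [PySem.Dict.items_eq_map_keys d hd 0, PySem.Dict.items_eq_map_keys d' (hk ▸ hd) 0, hk]
  exact List.map_congr_left (fun k _ => by rw [hv k])

lemma update_of_subset (s : PySem.Set Int) (xs : List Int) (h : ∀ x ∈ xs, x ∈ s) :
    PySem.Set.update s xs = s := by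
  induction xs generalizing s with
  | nil => rfl
  | cons x xs ih =>
    rw [PySem.Set.update_cons, PySem.Set.add_of_mem (h x (by simp))]
    exact ih s (fun y hy => h y (by simp [hy]))

/-- Two passes over the same list merge into one weighted pass. -/
lemma cpass_cpass (a b : Int) (xs : List Int) (d : PySem.Dict Int Int)
    (hd : d.keys.Nodup) : cpass a xs (cpass b xs d) = cpass (a + b) xs d := by
  refine dict_ext_getD _ _ (nodup_cpass _ _ _ (nodup_cpass _ _ _ hd)) ?_ ?_
  · rw [keys_cpass, keys_cpass, keys_cpass,
      update_of_subset _ _ (fun x hx => (PySem.Set.mem_update d.keys xs x).mpr (Or.inr hx))]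
  · intro v; rw [getD_cpass, getD_cpass, getD_cpass]; ring

/-- Repeating the unit pass k ≥ 1 times over the same list is one weighted pass. -/
lemma cpass_iterate (L : List Int) (xs : List Int) (d : PySem.Dict Int Int)
    (hL : L ≠ []) (hd : d.keys.Nodup) :
    L.foldl (fun d _ => cpass 1 xs d) d = cpass (L.length : Int) xs d := by
  induction L generalizing d with
  | nil => exact absurd rfl hL
  | cons i t ih =>
    rcases eq_or_ne t [] with rfl | ht
    · simp only [List.foldl_cons, List.foldl_nil, List.length_cons, List.length_nil]
      norm_num
    · have hc : (((i :: t).length : Nat) : Int) = 1 + (t.length : Int) := by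
        simp [add_comm]
      rw [List.foldl_cons, ih (cpass 1 xs d) ht (nodup_cpass _ _ _ hd),
        cpass_cpass _ _ _ _ hd, hc, add_comm (1 : Int)]

/-- Counting over a concatenation built by a fold is the nested counting fold. -/
lemma counter_concat (R : List Int) (row : Int → List Int) (seq0 : List Int)
    (d : PySem.Dict Int Int) :
    (R.foldl (fun (sq : List Int) s => sq ++ row s) seq0).foldl
        (fun d v => d.modify v 0 (· + 1)) d
      = R.foldl (fun d s => cpass 1 (row s) d)
          (seq0.foldl (fun d v => d.modify v 0 (· + 1)) d) := by
  induction R generalizing seq0 d with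
  | nil => rfl
  | cons s t ih => simp only [List.foldl_cons, ih (seq0 ++ row s) d, List.foldl_append]; rfl

/-- The rotation slice is a window of the doubled list. -/
lemma rot_eq_window (arr : List Int) (i : Int) (hi : 0 ≤ i) :
    PySem.List.slice arr (some i) none ++ PySem.List.slice arr none (some i)
      = ((arr ++ arr).drop (min i.toNat arr.length)).take arr.length := by
  rw [PySem.List.slice_from _ hi, PySem.List.slice_to _ hi]
  by_cases h : i.toNat ≤ arr.length
  · rw [min_eq_left h, List.drop_append, Nat.sub_eq_zero_of_le h, List.drop_zero,
      List.take_append, List.take_of_length_le (l := arr.drop i.toNat) (by simp),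
      List.length_drop]
    congr 1
    congr 1
    omega
  · rw [min_eq_right (by omega), List.drop_append, Nat.sub_self, List.drop_zero,
      List.drop_of_length_le (le_refl _), List.nil_append,
      List.take_of_length_le (le_refl _),
      List.drop_of_length_le (by omega), List.take_of_length_le (by omega), List.nil_append]

/-- B's slice of the doubled list is the same window. -/
lemma sliceB_eq_window (arr : List Int) (s : Int) (h0 : 0 ≤ s) (hs : s ≤ (arr.length : Int)) :
    PySem.List.slice (arr ++ arr) (some s) (some (s + (arr.length : Int)))
      = ((arr ++ arr).drop (min s.toNat arr.length)).take arr.length := by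
  rw [PySem.List.slice_toNat _ h0 (by omega), min_eq_left (by omega)]
  congr 1
  omega

/-- For an offset past the end the rotation window is `arr` itself. -/
lemma window_ge (arr : List Int) (i : Int) (hi : (arr.length : Int) ≤ i) :
    ((arr ++ arr).drop (min i.toNat arr.length)).take arr.length = arr := by
  rw [min_eq_right (by omega), List.drop_left, List.take_length]

/-- The counting dict after A's first `min l n` rotations equals B's Counter. -/
lemma head_eq (arr : List Int) (m : Int) (hm : m ≤ (arr.length : Int)) :
    (PySem.List.pyRange 0 m 1).foldl
      (fun d i =>
        ((PySem.List.slice arr (some i) none ++ PySem.List.slice arr none (some i)).foldl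
          (fun (st : Int × PySem.Dict Int Int) cur =>
            (st.1 + cur, st.2.modify (st.1 + cur) 0 (· + 1)))
          ((0 : Int), d)).2)
      PySem.Dict.empty
    = PySem.Dict.counter
        ((PySem.List.pyRange 0 m 1).foldl
          (fun (seq : List Int) s =>
            ((PySem.List.slice (arr ++ arr) (some s) (some (s + (arr.length : Int)))).foldl
              (fun (st : Int × List Int) x => (st.1 + x, st.2 ++ [st.1 + x]))
              ((0 : Int), seq)).2)
          []) := by
  rw [PySem.Dict.counter_eq_foldl]
  have hb : ∀ (seq : List Int), ∀ s ∈ PySem.List.pyRange 0 m 1,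
      ((PySem.List.slice (arr ++ arr) (some s) (some (s + (arr.length : Int)))).foldl
        (fun (st : Int × List Int) x => (st.1 + x, st.2 ++ [st.1 + x]))
        ((0 : Int), seq)).2
      = seq ++ partialSums 0 (((arr ++ arr).drop (min s.toNat arr.length)).take arr.length) := by
    intro seq s hs
    obtain ⟨h0, hlt⟩ := (PySem.List.mem_pyRange_one).mp hs
    rw [sliceB_eq_window arr s h0 (le_trans (le_of_lt hlt) hm), accumS]
  rw [PySem.List.foldl_congr_mem _ _
      (fun (sq : List Int) s => sq ++ partialSums 0
        (((arr ++ arr).drop (min s.toNat arr.length)).take arr.length)) _ hb,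
    counter_concat]
  apply PySem.List.foldl_congr_mem
  intro d i hi
  have h0 : 0 ≤ i := ((PySem.List.mem_pyRange_one).mp hi).1
  rw [accumA, rot_eq_window arr i h0]

-- ===== VERDICT (by name: the statement is the Claim_ definition above) =====
theorem suffixSum_spec : Claim_equal_suffixSum := by
  intro arr l _
  unfold Spec_suffixSum suffixSum suffixSum_alt
  simp only []
  by_cases hl : l ≤ (arr.length : Int)
  · -- no repeated rotations: min l n = l and B's weighted pass is skipped
    rw [min_eq_left hl, if_neg (by omega), head_eq arr l hl]
  · -- l > n: split A's range at n; the tail is l-n identical passes over arr's sums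
    have hn : (0 : Int) ≤ (arr.length : Int) := by positivity
    rw [min_eq_right (by omega), if_pos (by omega),
      PySem.List.pyRange_one_append 0 (arr.length : Int) l hn (by omega), List.foldl_append,
      head_eq arr (arr.length : Int) le_rfl]
    have htail : ∀ (d : PySem.Dict Int Int), ∀ i ∈ PySem.List.pyRange (arr.length : Int) l 1,
        ((PySem.List.slice arr (some i) none ++ PySem.List.slice arr none (some i)).foldl
          (fun (st : Int × PySem.Dict Int Int) cur =>
            (st.1 + cur, st.2.modify (st.1 + cur) 0 (· + 1)))
          ((0 : Int), d)).2 = cpass 1 (partialSums 0 arr) d := by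
      intro d i hi
      obtain ⟨h1, _⟩ := (PySem.List.mem_pyRange_one).mp hi
      rw [accumA, rot_eq_window arr i (le_trans hn h1), window_ge arr i h1]
    rw [PySem.List.foldl_congr_mem _ _ (fun d _ => cpass 1 (partialSums 0 arr) d) _ htail,
      cpass_iterate _ _ _
        (by simp [← List.length_pos_iff, PySem.List.length_pyRange_one]; omega)
        (PySem.Dict.nodup_keys_counter _),
      accumW, PySem.List.length_pyRange_one,
      show (((l - (arr.length : Int)).toNat : Int)) = l - (arr.length : Int) by omega]
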